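-- pv_equiv track=rewrite | github.com/ile123/GA-2023 | Vjezba 5/batistic_ilario_v5_zad1.py | shortest_distance_by_vertex
-- ===== SOURCE A (Python) =====
-- def shortest_distance_by_vertex(arcs, used_arcs, vertex, visited):
--     all_arcs_by_vertex = []
--     viable_arcs = []
--     for arc in arcs:
--         if vertex == arc[0]:
--             all_arcs_by_vertex.append(arc)
--     for arc in all_arcs_by_vertex:
--         if arc not in used_arcs and (arc[1], arc[0], arc[2]) not in used_arcs and arc[1] not in visited:
--             viable_arcs.append(arc)
--     viable_arcs.sort(key=lambda x: x[2])
--     return viable_arcs[0] if len(viable_arcs) > 0 else None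
-- ===== SOURCE B (Python) =====
-- def shortest_distance_by_vertex(arcs, used_arcs, vertex, visited):
--     best = None
--     for arc in arcs:
--         if (vertex == arc[0] and arc not in used_arcs
--                 and (arc[1], arc[0], arc[2]) not in used_arcs
--                 and arc[1] not in visited):
--             if best is None or arc[2] < best[2]:
--                 best = arc
--     return best
-- ===== Notes on version B (the rewrite author's own statement) =====
-- stated objective: simpler
-- what changed: Replaced the two materialized filter lists plus sort-then-index with a single running-minimum pass over arcs (strict-< update preserves the stable sort's first-minimal tie-break).
import Mathlib
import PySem

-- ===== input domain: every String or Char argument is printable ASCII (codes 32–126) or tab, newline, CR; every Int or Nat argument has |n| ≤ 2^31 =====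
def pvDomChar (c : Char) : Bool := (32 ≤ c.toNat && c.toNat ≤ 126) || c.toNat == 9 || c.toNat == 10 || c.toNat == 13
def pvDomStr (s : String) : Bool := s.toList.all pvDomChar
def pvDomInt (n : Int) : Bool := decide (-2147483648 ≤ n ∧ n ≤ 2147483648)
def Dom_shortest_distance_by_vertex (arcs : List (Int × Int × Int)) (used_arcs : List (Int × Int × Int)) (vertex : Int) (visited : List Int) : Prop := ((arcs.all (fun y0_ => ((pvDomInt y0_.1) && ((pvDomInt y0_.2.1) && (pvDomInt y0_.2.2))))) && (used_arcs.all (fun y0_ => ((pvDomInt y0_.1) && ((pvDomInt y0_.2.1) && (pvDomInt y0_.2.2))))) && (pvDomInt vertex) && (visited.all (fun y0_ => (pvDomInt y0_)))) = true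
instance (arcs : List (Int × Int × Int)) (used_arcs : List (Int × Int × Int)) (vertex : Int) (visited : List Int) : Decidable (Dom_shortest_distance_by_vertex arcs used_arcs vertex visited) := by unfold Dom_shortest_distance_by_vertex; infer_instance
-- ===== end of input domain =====

-- B fuses A's two filter passes and the sort-then-index into one running-minimum scan
-- (strict-< update reproduces the stable sort's first-minimal tie-break): simpler, no materialized lists.


-- ===== PORT A =====
def shortest_distance_by_vertex (arcs : List (Int × Int × Int)) (used_arcs : List (Int × Int × Int)) (vertex : Int) (visited : List Int) : Option (Int × Int × Int) :=
  let all_arcs_by_vertex : List (Int × Int × Int) :=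
    arcs.foldl (fun acc arc => if vertex == arc.1 then acc ++ [arc] else acc) []
  let viable_arcs : List (Int × Int × Int) :=
    all_arcs_by_vertex.foldl (fun acc arc =>
      if !used_arcs.contains arc && !used_arcs.contains (arc.2.1, arc.1, arc.2.2)
          && !visited.contains arc.2.1 then acc ++ [arc] else acc) []
  let sorted_viable := PySem.List.sorted viable_arcs (fun x => x.2.2)
  match sorted_viable with
  | [] => none
  | v :: _ => some v

-- ===== PORT B =====
def shortest_distance_by_vertex_alt (arcs : List (Int × Int × Int)) (used_arcs : List (Int × Int × Int)) (vertex : Int) (visited : List Int) : Option (Int × Int × Int) :=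
  arcs.foldl (fun best arc =>
    if vertex == arc.1 && !used_arcs.contains arc
        && !used_arcs.contains (arc.2.1, arc.1, arc.2.2)
        && !visited.contains arc.2.1 then
      match best with
      | none => some arc
      | some b => if arc.2.2 < b.2.2 then some arc else some b
    else best) none

-- ===== PRECONDITION & SPEC =====
def Spec_shortest_distance_by_vertex (arcs : List (Int × Int × Int)) (used_arcs : List (Int × Int × Int)) (vertex : Int) (visited : List Int) (out : Option (Int × Int × Int)) : Prop := out = shortest_distance_by_vertex_alt arcs used_arcs vertex visited
instance (arcs : List (Int × Int × Int)) (used_arcs : List (Int × Int × Int)) (vertex : Int) (visited : List Int) (out : Option (Int × Int × Int)) : Decidable (Spec_shortest_distance_by_vertex arcs used_arcs vertex visited out) := by unfold Spec_shortest_distance_by_vertex; infer_instance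

-- ===== CLAIM (what is proved, stated in full; the proofs are below) =====
def Claim_equal_shortest_distance_by_vertex : Prop := ∀ (arcs : List (Int × Int × Int)) (used_arcs : List (Int × Int × Int)) (vertex : Int) (visited : List Int), Dom_shortest_distance_by_vertex arcs used_arcs vertex visited → Spec_shortest_distance_by_vertex arcs used_arcs vertex visited (shortest_distance_by_vertex arcs used_arcs vertex visited)

-- ===== LEMMAS AND PROOFS =====

-- proof-only names for A's two selection predicates and B's fused guard
def pvP1 (vertex : Int) (arc : Int × Int × Int) : Bool := vertex == arc.1

def pvP2 (used_arcs : List (Int × Int × Int)) (visited : List Int) (arc : Int × Int × Int) : Bool :=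
  !used_arcs.contains arc && !used_arcs.contains (arc.2.1, arc.1, arc.2.2) && !visited.contains arc.2.1

def pvG (used_arcs : List (Int × Int × Int)) (vertex : Int) (visited : List Int) (arc : Int × Int × Int) : Bool :=
  vertex == arc.1 && !used_arcs.contains arc && !used_arcs.contains (arc.2.1, arc.1, arc.2.2)
    && !visited.contains arc.2.1

-- running-minimum step (first-minimal tie-break: keep the old best on equal keys)
def pvMinStep (best : Option (Int × Int × Int)) (arc : Int × Int × Int) : Option (Int × Int × Int) :=
  match best with
  | none => some arc
  | some b => if arc.2.2 < b.2.2 then some arc else some b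

theorem pv_head_insertBy (x : Int × Int × Int) (ys : List (Int × Int × Int)) :
    (PySem.List.insertBy (fun a b : Int × Int × Int => decide (a.2.2 < b.2.2)) x ys).head? =
      pvMinStep ys.head? x := by
  cases ys with
  | nil => rfl
  | cons y ys =>
    by_cases h : x.2.2 < y.2.2
    · simp [PySem.List.insertBy, pvMinStep, h]
    · simp [PySem.List.insertBy, pvMinStep, h]

theorem pv_head_foldl_insertBy (xs : List (Int × Int × Int)) (acc : List (Int × Int × Int)) :
    (xs.foldl (fun acc x => PySem.List.insertBy
        (fun a b : Int × Int × Int => decide (a.2.2 < b.2.2)) x acc) acc).head? =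
      xs.foldl pvMinStep acc.head? := by
  induction xs generalizing acc with
  | nil => rfl
  | cons x xs ih =>
    simp only [List.foldl_cons]
    rw [ih, pv_head_insertBy]

theorem pv_head_sorted (xs : List (Int × Int × Int)) :
    (PySem.List.sorted xs (fun x => x.2.2)).head? = xs.foldl pvMinStep none := by
  rw [PySem.List.sorted_eq_foldl_insertBy]
  exact pv_head_foldl_insertBy xs []

theorem pv_A_closed (arcs used_arcs : List (Int × Int × Int)) (vertex : Int) (visited : List Int) :
    shortest_distance_by_vertex arcs used_arcs vertex visited =
      (PySem.List.sorted ((arcs.filter (pvP1 vertex)).filter (pvP2 used_arcs visited))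
        (fun x => x.2.2)).head? := by
  show (match PySem.List.sorted
      ((arcs.foldl (fun acc arc => if pvP1 vertex arc then acc ++ [id arc] else acc) []).foldl
        (fun acc arc => if pvP2 used_arcs visited arc then acc ++ [id arc] else acc) [])
      (fun x => x.2.2) with
    | [] => none
    | v :: _ => some v) = _
  rw [PySem.List.foldl_append_if, PySem.List.foldl_append_if]
  simp only [List.nil_append, List.map_id]
  generalize PySem.List.sorted ((arcs.filter (pvP1 vertex)).filter (pvP2 used_arcs visited))
      (fun x => x.2.2) = s
  cases s <;> rfl

theorem pv_B_closed (arcs used_arcs : List (Int × Int × Int)) (vertex : Int) (visited : List Int) :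
    shortest_distance_by_vertex_alt arcs used_arcs vertex visited =
      (arcs.filter (pvG used_arcs vertex visited)).foldl pvMinStep none := by
  rw [List.foldl_filter]
  have hf : (fun (best : Option (Int × Int × Int)) (arc : Int × Int × Int) =>
      if vertex == arc.1 && !used_arcs.contains arc
          && !used_arcs.contains (arc.2.1, arc.1, arc.2.2)
          && !visited.contains arc.2.1 then
        match best with
        | none => some arc
        | some b => if arc.2.2 < b.2.2 then some arc else some b
      else best)
      = (fun best arc => if pvG used_arcs vertex visited arc then pvMinStep best arc else best) := by
    funext best arc
    cases best <;> rfl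
  show arcs.foldl _ none = _
  rw [hf]

-- ===== VERDICT (by name: the statement is the Claim_ definition above) =====
theorem shortest_distance_by_vertex_spec : Claim_equal_shortest_distance_by_vertex := by
  intro arcs used_arcs vertex visited _
  show shortest_distance_by_vertex arcs used_arcs vertex visited
      = shortest_distance_by_vertex_alt arcs used_arcs vertex visited
  rw [pv_A_closed, pv_B_closed, List.filter_filter, pv_head_sorted]
  congr 1
  exact List.filter_congr (fun a _ => by
    simp [pvG, pvP1, pvP2, Bool.and_comm, Bool.and_assoc, Bool.and_left_comm])
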